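-- pv_equiv track=rewrite | github.com/chrisgarcia001/Adaptive-Virtual-Team-Coordination | src/runners.py | build_factorial_param_combs
-- ===== SOURCE A (Python) =====
-- def build_factorial_param_combs(base_params, high_levels):
--     merge = lambda d1, d2: dict(list(d1.items()) + list(d2.items()))
--     if len(high_levels) == 1:
--         return [('m', dict(base_params)), ('p', merge(base_params, high_levels[0]))]
--     else:
--         low = [('m' + x, y) for (x, y) in build_factorial_param_combs(base_params, high_levels[1:])]
--         high = [('p' + x, y) for (x, y) in build_factorial_param_combs(merge(base_params, high_levels[0]), high_levels[1:])]
--         return low + high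
-- ===== SOURCE B (Python) =====
-- def build_factorial_param_combs(base_params, high_levels):
--     n = len(high_levels)
--     results = []
--     for i in range(2 ** n):
--         label = ''
--         d = dict(base_params)
--         for j in range(n):
--             if (i >> (n - 1 - j)) & 1:
--                 label += 'p'
--                 d.update(high_levels[j])
--             else:
--                 label += 'm'
--         results.append((label, d))
--     return results
-- ===== Notes on version B (the rewrite author's own statement) =====
-- stated objective: alternative
-- what changed: Replaces A's binary recursion (recursing on the tail of high_levels and concatenating prefixed copies) with a single iterative loop over the 2^n bit patterns that builds each label and merged dict directly from the bits of the index.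
-- crash fix: On high_levels = [] Python A recurses forever and raises RecursionError, while B returns the single combination [('', dict(base_params))]. — e.g. on build_factorial_param_combs([("a", 1)], []): A raises RecursionError, B returns [("", [("a", 1)])]
import Mathlib
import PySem

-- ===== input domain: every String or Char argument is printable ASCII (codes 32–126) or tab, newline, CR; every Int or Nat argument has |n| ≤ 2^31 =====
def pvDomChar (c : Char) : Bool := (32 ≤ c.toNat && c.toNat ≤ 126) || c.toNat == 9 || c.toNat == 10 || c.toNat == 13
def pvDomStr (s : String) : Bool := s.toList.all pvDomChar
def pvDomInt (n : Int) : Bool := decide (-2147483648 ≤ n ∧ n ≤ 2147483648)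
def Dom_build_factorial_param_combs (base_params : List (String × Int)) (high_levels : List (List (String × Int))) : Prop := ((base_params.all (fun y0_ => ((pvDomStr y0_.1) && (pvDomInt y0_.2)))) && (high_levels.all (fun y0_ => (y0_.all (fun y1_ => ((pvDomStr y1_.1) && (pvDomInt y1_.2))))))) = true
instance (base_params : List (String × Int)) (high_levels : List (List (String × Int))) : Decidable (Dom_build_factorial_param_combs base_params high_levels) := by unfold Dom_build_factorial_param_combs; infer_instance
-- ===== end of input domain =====

-- B replaces A's branching recursion by a single loop over the 2^n bit patterns (alternative
-- decomposition, same exponential output size); equivalence is about the return value only.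

-- ===== PORT A =====
-- A's recursion never terminates on high_levels = [] (Python RecursionError); that input is
-- excluded by Pre_ and the port returns [] there as a totality guard.
def build_factorial_param_combs (base_params : List (String × Int)) (high_levels : List (List (String × Int))) : List (String × (List (String × Int))) :=
  match high_levels with
  | [] => []
  | [h] =>
      [("m", (PySem.Dict.ofList base_params).items),
       ("p", (PySem.Dict.ofList (base_params ++ h)).items)]
  | h :: h2 :: t =>
      let low := (build_factorial_param_combs base_params (h2 :: t)).map
        (fun p => ("m" ++ p.1, p.2))
      let high := (build_factorial_param_combs (PySem.Dict.ofList (base_params ++ h)).items (h2 :: t)).map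
        (fun p => ("p" ++ p.1, p.2))
      low ++ high

-- ===== PORT B =====
-- inner loop of B: walk high_levels left to right; the bit for position j is
-- (i >> (n-1-j)) & 1, and n-1-j is exactly the length of the remaining tail.
def pvRowB (i : Nat) : List (List (String × Int)) → String × PySem.Dict String Int → String × PySem.Dict String Int
  | [], acc => acc
  | h :: t, acc =>
      if (i >>> t.length) &&& 1 = 1 then
        pvRowB i t (acc.1 ++ "p", acc.2.update h)
      else
        pvRowB i t (acc.1 ++ "m", acc.2)

def build_factorial_param_combs_alt (base_params : List (String × Int)) (high_levels : List (List (String × Int))) : List (String × (List (String × Int))) :=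
  (List.range (2 ^ high_levels.length)).map (fun i =>
    let r := pvRowB i high_levels ("", PySem.Dict.ofList base_params)
    (r.1, r.2.items))

-- ===== PRECONDITION & SPEC =====
-- Pre_ excludes only high_levels = [], on which Python A recurses forever and raises RecursionError.
def Pre_build_factorial_param_combs (base_params : List (String × Int)) (high_levels : List (List (String × Int))) : Prop := high_levels ≠ []
instance (base_params : List (String × Int)) (high_levels : List (List (String × Int))) : Decidable (Pre_build_factorial_param_combs base_params high_levels) := by unfold Pre_build_factorial_param_combs; infer_instance
def pvWitness_build_factorial_param_combs : (List (String × Int)) × (List (List (String × Int))) := ([("a", 1)], [[("b", 2)]])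

-- On high_levels = [] Python A raises RecursionError while B returns the single empty-label combination.
def Raises_build_factorial_param_combs (base_params : List (String × Int)) (high_levels : List (List (String × Int))) : Prop := high_levels = []
instance (base_params : List (String × Int)) (high_levels : List (List (String × Int))) : Decidable (Raises_build_factorial_param_combs base_params high_levels) := by unfold Raises_build_factorial_param_combs; infer_instance
def pvRaiseWitness_build_factorial_param_combs : (List (String × Int)) × (List (List (String × Int))) := ([("a", 1)], [])
def pvRaiseWitnessOut_build_factorial_param_combs : List (String × (List (String × Int))) := [("", [("a", 1)])]

def Spec_build_factorial_param_combs (base_params : List (String × Int)) (high_levels : List (List (String × Int))) (out : List (String × (List (String × Int)))) : Prop := out = build_factorial_param_combs_alt base_params high_levels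
instance (base_params : List (String × Int)) (high_levels : List (List (String × Int))) (out : List (String × (List (String × Int)))) : Decidable (Spec_build_factorial_param_combs base_params high_levels out) := by unfold Spec_build_factorial_param_combs; infer_instance

-- ===== CLAIM (what is proved, stated in full; the proofs are below) =====
def Claim_equal_build_factorial_param_combs : Prop := ∀ (base_params : List (String × Int)) (high_levels : List (List (String × Int))), Dom_build_factorial_param_combs base_params high_levels → Pre_build_factorial_param_combs base_params high_levels → Spec_build_factorial_param_combs base_params high_levels (build_factorial_param_combs base_params high_levels)
def Claim_raises_build_factorial_param_combs : Prop := (∀ (base_params : List (String × Int)) (high_levels : List (List (String × Int))), Dom_build_factorial_param_combs base_params high_levels → Raises_build_factorial_param_combs base_params high_levels → ¬ Pre_build_factorial_param_combs base_params high_levels) ∧ (Dom_build_factorial_param_combs (pvRaiseWitness_build_factorial_param_combs.1) (pvRaiseWitness_build_factorial_param_combs.2) ∧ Raises_build_factorial_param_combs (pvRaiseWitness_build_factorial_param_combs.1) (pvRaiseWitness_build_factorial_param_combs.2) ∧ build_factorial_param_combs_alt (pvRaiseWitness_build_factorial_param_combs.1) (pvRaiseWitness_build_factorial_param_combs.2)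 = pvRaiseWitnessOut_build_factorial_param_combs)

-- ===== LEMMAS AND PROOFS =====

-- the label accumulator factors out of pvRowB
theorem pvRowB_prefix (i : Nat) : ∀ (t : List (List (String × Int))) (s : String) (d : PySem.Dict String Int),
    pvRowB i t (s, d) = (s ++ (pvRowB i t ("", d)).1, (pvRowB i t ("", d)).2) := by
  intro t
  induction t with
  | nil => intro s d; simp [pvRowB]
  | cons h t ih =>
    intro s d
    by_cases hb : (i >>> t.length) &&& 1 = 1
    · simp only [pvRowB, hb, if_true]
      rw [ih (s ++ "p"), ih ("" ++ "p")]
      simp [String.append_assoc]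
    · simp only [pvRowB, hb]
      rw [ih (s ++ "m"), ih ("" ++ "m")]
      simp [String.append_assoc]

-- bit extraction below position m ignores an added 2^m
theorem pv_bit_add_pow (k m i : Nat) (hk : k < m) (hi : i < 2 ^ m) :
    ((2 ^ m + i) >>> k) &&& 1 = (i >>> k) &&& 1 := by
  rw [Nat.and_one_is_mod, Nat.and_one_is_mod, Nat.shiftRight_eq_div_pow, Nat.shiftRight_eq_div_pow]
  obtain ⟨j, rfl⟩ : ∃ j, m = k + (j + 1) := ⟨m - k - 1, by omega⟩
  have h1 : 2 ^ (k + (j + 1)) = 2 ^ (j + 1) * 2 ^ k := by rw [pow_add, mul_comm]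
  have hp : 0 < 2 ^ k := Nat.two_pow_pos k
  rw [h1, Nat.add_comm, Nat.add_mul_div_right _ _ hp]
  have h2 : 2 ^ (j + 1) = 2 * 2 ^ j := by rw [pow_succ, mul_comm]
  omega

theorem pv_bit_top (m i : Nat) (hi : i < 2 ^ m) : ((2 ^ m + i) >>> m) &&& 1 = 1 := by
  rw [Nat.and_one_is_mod, Nat.shiftRight_eq_div_pow]
  have hp : 0 < 2 ^ m := Nat.two_pow_pos m
  rw [Nat.add_comm, Nat.add_div_right _ hp, Nat.div_eq_of_lt hi]

theorem pv_bit_low (m i : Nat) (hi : i < 2 ^ m) : (i >>> m) &&& 1 = 0 := by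
  rw [Nat.and_one_is_mod, Nat.shiftRight_eq_div_pow, Nat.div_eq_of_lt hi]

-- pvRowB only inspects bits below the length of its list argument
theorem pvRowB_add_pow (m i : Nat) (hi : i < 2 ^ m) :
    ∀ (t : List (List (String × Int))), t.length ≤ m → ∀ acc,
      pvRowB (2 ^ m + i) t acc = pvRowB i t acc := by
  intro t
  induction t with
  | nil => intro _ acc; simp [pvRowB]
  | cons h t ih =>
    intro hlen acc
    have hk : t.length < m := by simp at hlen; omega
    simp only [pvRowB, pv_bit_add_pow t.length m i hk hi]
    by_cases hb : (i >>> t.length) &&& 1 = 1 <;>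
      simp [hb, ih (by omega)]

theorem pv_ofList_append (bp h : List (String × Int)) :
    PySem.Dict.ofList (bp ++ h) = (PySem.Dict.ofList bp).update h := by
  simp [PySem.Dict.ofList, PySem.Dict.update, List.foldl_append]

theorem pv_ofList_items (d : PySem.Dict String Int) (hnd : d.keys.Nodup) :
    PySem.Dict.ofList d.items = d := by
  apply PySem.Dict.ext
  have h1 : ∀ a ∈ d.items, (PySem.Dict.empty : PySem.Dict String Int).contains a.1 = false := by
    intro a _; exact PySem.Dict.contains_empty a.1
  have h2 : (d.items.map Prod.fst).Nodup := by
    simpa [PySem.Dict.keys] using hnd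
  have := PySem.Dict.items_foldl_insert_fresh (l := d.items) (k := Prod.fst) (v := Prod.snd)
    (d := PySem.Dict.empty) h1 h2
  simp only [PySem.Dict.ofList, PySem.Dict.update]
  calc (List.foldl (fun acc p => acc.insert p.1 p.2) PySem.Dict.empty d.items).items
      = (List.foldl (fun acc p => acc.insert p.1 p.2) PySem.Dict.empty d.items).items := rfl
    _ = d.items := by
        rw [show (fun (acc : PySem.Dict String Int) (p : String × Int) => acc.insert p.1 p.2)
              = (fun acc p => acc.insert (Prod.fst p) (Prod.snd p)) from rfl]
        rw [this]
        simp [PySem.Dict.empty]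

-- B satisfies A's recurrence
theorem pv_alt_rec (h : List (String × Int)) (t : List (List (String × Int))) (bp : List (String × Int)) :
    build_factorial_param_combs_alt bp (h :: t) =
      (build_factorial_param_combs_alt bp t).map (fun p => ("m" ++ p.1, p.2)) ++
      (build_factorial_param_combs_alt (PySem.Dict.ofList (bp ++ h)).items t).map (fun p => ("p" ++ p.1, p.2)) := by
  have hof : PySem.Dict.ofList ((PySem.Dict.ofList (bp ++ h)).items) = PySem.Dict.ofList (bp ++ h) :=
    pv_ofList_items _ (PySem.Dict.nodup_keys_ofList _)
  unfold build_factorial_param_combs_alt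
  rw [List.length_cons, pow_succ, Nat.mul_two, List.range_add, List.map_append, List.map_map, List.map_map, List.map_map]
  congr 1
  · apply List.map_congr_left
    intro i hi
    have hi' : i < 2 ^ t.length := List.mem_range.mp hi
    simp only [pvRowB, pv_bit_low t.length i hi']
    rw [if_neg (by omega)]
    rw [pvRowB_prefix]
    simp
  · apply List.map_congr_left
    intro i hi
    have hi' : i < 2 ^ t.length := List.mem_range.mp hi
    simp only [Function.comp, pvRowB, pv_bit_top t.length i hi']
    simp only [if_true]
    rw [pvRowB_add_pow t.length i hi' t (le_refl _)]
    rw [hof, ← pv_ofList_append]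
    rw [pvRowB_prefix]
    simp

theorem pv_main : ∀ (hl : List (List (String × Int))) (bp : List (String × Int)), hl ≠ [] →
    build_factorial_param_combs bp hl = build_factorial_param_combs_alt bp hl := by
  intro hl
  induction hl with
  | nil => intro bp hne; exact absurd rfl hne
  | cons h t ih =>
    intro bp _
    match t with
    | [] =>
      have hof : PySem.Dict.ofList ((PySem.Dict.ofList (bp ++ h)).items) = PySem.Dict.ofList (bp ++ h) :=
        pv_ofList_items _ (PySem.Dict.nodup_keys_ofList _)
      rw [pv_alt_rec]
      unfold build_factorial_param_combs_alt
      simp only [List.length_nil, pow_zero, List.range_one, List.map_cons, List.map_nil, pvRowB, hof]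
      show build_factorial_param_combs bp [h] = _
      unfold build_factorial_param_combs
      rw [pv_ofList_append]
      simp
    | h2 :: t' =>
      rw [pv_alt_rec]
      show (build_factorial_param_combs bp (h2 :: t')).map _ ++ (build_factorial_param_combs (PySem.Dict.ofList (bp ++ h)).items (h2 :: t')).map _ = _
      rw [ih bp (by simp), ih _ (by simp)]

-- ===== VERDICT (by name: the statement is the Claim_ definition above) =====
theorem build_factorial_param_combs_spec : Claim_equal_build_factorial_param_combs := by
  intro bp hl _ hpre
  exact pv_main hl bp hpre

@[simp]
theorem build_factorial_param_combs_raises : Claim_raises_build_factorial_param_combs := by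
  unfold Claim_raises_build_factorial_param_combs
  exact ⟨fun bp hl _ hr => by simp [Pre_build_factorial_param_combs]; exact hr, by decide⟩
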